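-- pv_equiv track=rewrite | github.com/SamuelJJuarez/Sistemas_programables | ControlRemoto.py | scale_matrix
-- ===== SOURCE A (Python) =====
-- def scale_matrix(matriz, factor):
--     salida = [] # Lista que almacenará la matriz escalada
--     # Recorre cada fila de la matriz original
--     for fila in matriz:
--         nueva_fila = [] # Crea una nueva fila para la matriz escalada
--         # Recorre cada columna o valor de la fila actual
--         for valor in fila:
--             nueva_fila.extend([valor] * factor) # Extiende la nueva fila repitiendo cada píxel tantas veces como indique el factor
--         # Repite la fila expandida tantas veces como indique el factor
--         for _ in range(factor):
--             salida.append(list(nueva_fila)) # Agrega la nueva fila a la matriz del ícono aumentado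
--
--     return salida # Devuelve la matriz aumentada
-- ===== SOURCE B (Python) =====
-- def scale_matrix(matriz, factor):
--     if not matriz:
--         return []
--     fila = matriz[0]
--     expandida = _expand(fila, factor)
--     return [list(expandida) for _ in range(factor)] + scale_matrix(matriz[1:], factor)
--
-- def _expand(fila, factor):
--     if not fila:
--         return []
--     return [fila[0]] * factor + _expand(fila[1:], factor)
-- ===== Notes on version B (the rewrite author's own statement) =====
-- stated objective: alternative
-- what changed: B is a structural recursion that builds the output front-to-back by concatenation (factor copies of the recursively expanded head row, prepended to the recursive result on the tail), replacing A's iterative accumulator loops with append/extend.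
import Mathlib
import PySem

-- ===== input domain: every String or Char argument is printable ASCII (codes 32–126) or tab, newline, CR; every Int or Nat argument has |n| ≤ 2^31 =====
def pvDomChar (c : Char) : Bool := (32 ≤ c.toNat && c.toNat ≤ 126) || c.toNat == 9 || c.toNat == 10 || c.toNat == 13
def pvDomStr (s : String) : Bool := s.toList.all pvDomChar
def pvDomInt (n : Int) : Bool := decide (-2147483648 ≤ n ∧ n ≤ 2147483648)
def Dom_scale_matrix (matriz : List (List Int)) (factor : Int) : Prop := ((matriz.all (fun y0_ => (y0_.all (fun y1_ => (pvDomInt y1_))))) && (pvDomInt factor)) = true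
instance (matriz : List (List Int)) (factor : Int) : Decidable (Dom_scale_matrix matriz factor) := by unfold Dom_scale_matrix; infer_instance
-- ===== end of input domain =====

-- B replaces A's iterative accumulator loops with a structural recursion building the output by concatenation; objective: alternative decomposition, same cost.

-- ===== PORT A =====
def scale_matrix (matriz : List (List Int)) (factor : Int) : List (List Int) :=
  matriz.foldl (fun salida fila =>
    let nueva_fila := fila.foldl (fun nf valor => nf ++ PySem.List.pyRepeat [valor] factor) []
    (PySem.List.pyRange 0 factor 1).foldl (fun s _ => s ++ [nueva_fila]) salida) []

-- ===== PORT B =====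
-- _expand(fila, factor): recursive expansion of one row
def pvExpand (fila : List Int) (factor : Int) : List Int :=
  match fila with
  | [] => []
  | v :: rest => PySem.List.pyRepeat [v] factor ++ pvExpand rest factor

-- recursion over the rows; [list(expandida) for _ in range(factor)] copies the same value
def scale_matrix_alt (matriz : List (List Int)) (factor : Int) : List (List Int) :=
  match matriz with
  | [] => []
  | fila :: rest =>
    let expandida := pvExpand fila factor
    (PySem.List.pyRange 0 factor 1).map (fun _ => expandida) ++ scale_matrix_alt rest factor

-- ===== PRECONDITION & SPEC =====
def Spec_scale_matrix (matriz : List (List Int)) (factor : Int) (out : List (List Int)) : Prop := out = scale_matrix_alt matriz factor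
instance (matriz : List (List Int)) (factor : Int) (out : List (List Int)) : Decidable (Spec_scale_matrix matriz factor out) := by unfold Spec_scale_matrix; infer_instance

-- ===== CLAIM (what is proved, stated in full; the proofs are below) =====
def Claim_equal_scale_matrix : Prop := ∀ (matriz : List (List Int)) (factor : Int), Dom_scale_matrix matriz factor → Spec_scale_matrix matriz factor (scale_matrix matriz factor)

-- ===== LEMMAS AND PROOFS =====

-- A's inner row loop computes init ++ pvExpand fila factor
theorem rowA_eq_expand (factor : Int) (xs : List Int) (init : List Int) :
    xs.foldl (fun nf v => nf ++ PySem.List.pyRepeat [v] factor) init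
      = init ++ pvExpand xs factor := by
  induction xs generalizing init with
  | nil => simp [pvExpand]
  | cons v t ih => rw [List.foldl_cons, ih, pvExpand, List.append_assoc]

-- A's row-repetition loop appends factor copies of x
theorem repeatA (factor : Int) (x : List Int) (init : List (List Int)) :
    (PySem.List.pyRange 0 factor 1).foldl (fun s _ => s ++ [x]) init
      = init ++ (PySem.List.pyRange 0 factor 1).map (fun _ => x) := by
  generalize PySem.List.pyRange 0 factor 1 = r
  induction r generalizing init with
  | nil => simp
  | cons a t ih => rw [List.foldl_cons, List.map_cons, ih]; simp

-- A's outer fold equals init ++ B's recursion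
theorem outer_eq (factor : Int) (matriz : List (List Int)) (init : List (List Int)) :
    matriz.foldl (fun salida fila =>
      let nueva_fila := fila.foldl (fun nf valor => nf ++ PySem.List.pyRepeat [valor] factor) []
      (PySem.List.pyRange 0 factor 1).foldl (fun s _ => s ++ [nueva_fila]) salida) init
      = init ++ scale_matrix_alt matriz factor := by
  induction matriz generalizing init with
  | nil => simp [scale_matrix_alt]
  | cons fila rest ih =>
    rw [List.foldl_cons, ih, scale_matrix_alt]
    simp only [rowA_eq_expand, List.nil_append, repeatA, List.append_assoc]

-- ===== VERDICT (by name: the statement is the Claim_ definition above) =====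
theorem scale_matrix_spec : Claim_equal_scale_matrix := by
  intro matriz factor _
  unfold Spec_scale_matrix scale_matrix
  rw [outer_eq, List.nil_append]
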